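-- pv_equiv track=rewrite | github.com/rodchristiansen/munkiadmin | MunkiAdmin/Scripts/yaml_bridge.py | sort_receipt_keys
-- ===== SOURCE A (Python) =====
-- RECEIPT_KEY_ORDER = ['packageid', 'name', 'filename', 'installed_size', 'version', 'optional']
--
-- def sort_receipt_keys(keys):
--     """Sort receipt dictionary keys with packageid first."""
--     ordered = []
--     other = []
--     for key in keys:
--         if key in RECEIPT_KEY_ORDER:
--             ordered.append(key)
--         else:
--             other.append(key)
--     # Sort ordered keys by their position in RECEIPT_KEY_ORDER
--     ordered.sort(key=lambda k: RECEIPT_KEY_ORDER.index(k) if k in RECEIPT_KEY_ORDER else 999)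
--     other.sort()
--     return ordered + other
-- ===== SOURCE B (Python) =====
-- RECEIPT_KEY_ORDER = ['packageid', 'name', 'filename', 'installed_size', 'version', 'optional']
--
-- def sort_receipt_keys(keys):
--     """Sort receipt dictionary keys with packageid first."""
--     # Known keys: gather occurrences bucket-by-bucket in the fixed order (no sort needed);
--     # unknown keys: one alphabetical sort.
--     known = [k for ok in RECEIPT_KEY_ORDER for k in keys if k == ok]
--     return known + sorted(k for k in keys if k not in RECEIPT_KEY_ORDER)
-- ===== Notes on version B (the rewrite author's own statement) =====
-- stated objective: simpler
-- what changed: Replaces the partition-then-two-sorts (with a sort keyed by repeated RECEIPT_KEY_ORDER.index lookups) by a bucket pass: one comprehension over the fixed key order collects the known keys already in order (no sort, no index calls), followed by a single alphabetical sort of the unknown keys.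
import Mathlib
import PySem

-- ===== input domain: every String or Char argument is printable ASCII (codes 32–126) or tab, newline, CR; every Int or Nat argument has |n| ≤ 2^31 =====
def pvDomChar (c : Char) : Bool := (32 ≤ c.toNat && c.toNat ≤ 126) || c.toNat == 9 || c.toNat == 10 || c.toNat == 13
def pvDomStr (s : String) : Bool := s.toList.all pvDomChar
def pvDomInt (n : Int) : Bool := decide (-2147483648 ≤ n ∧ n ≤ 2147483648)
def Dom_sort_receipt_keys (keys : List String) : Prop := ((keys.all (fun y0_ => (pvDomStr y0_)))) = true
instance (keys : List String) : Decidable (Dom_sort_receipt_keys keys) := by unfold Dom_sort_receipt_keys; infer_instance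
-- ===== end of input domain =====

-- B replaces A's partition-plus-two-sorts by a bucket pass over the fixed key order
-- (no sort and no index() scans for the known keys) plus one alphabetical sort of the rest: a simpler decomposition.


def RECEIPT_KEY_ORDER : List String :=
  ["packageid", "name", "filename", "installed_size", "version", "optional"]

-- ===== PORT A =====
-- the sort key lambda: 'RECEIPT_KEY_ORDER.index(k) if k in RECEIPT_KEY_ORDER else 999';
-- index() cannot fail under the guard, so the getD default is unreachable
def receiptKeyA (k : String) : Int :=
  if RECEIPT_KEY_ORDER.contains k then ((PySem.List.index? RECEIPT_KEY_ORDER k).getD 999 : Nat) else 999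

def sort_receipt_keys (keys : List String) : List String :=
  -- the for-loop filling the two accumulators 'ordered' and 'other'
  let p := keys.foldl
    (fun (acc : List String × List String) key =>
      if RECEIPT_KEY_ORDER.contains key then (acc.1 ++ [key], acc.2) else (acc.1, acc.2 ++ [key]))
    ([], [])
  let ordered := PySem.List.sorted p.1 receiptKeyA false
  let other := PySem.List.sorted p.2 (fun x => x) false
  ordered ++ other

-- ===== PORT B =====
def sort_receipt_keys_alt (keys : List String) : List String :=
  -- 'known = [k for ok in RECEIPT_KEY_ORDER for k in keys if k == ok]'
  (RECEIPT_KEY_ORDER.flatMap (fun ok => keys.filter (fun k => k == ok)))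
    ++ PySem.List.sorted (keys.filter (fun k => !RECEIPT_KEY_ORDER.contains k)) (fun x => x) false

-- ===== PRECONDITION & SPEC =====
def Spec_sort_receipt_keys (keys : List String) (out : List String) : Prop := out = sort_receipt_keys_alt keys
instance (keys : List String) (out : List String) : Decidable (Spec_sort_receipt_keys keys out) := by unfold Spec_sort_receipt_keys; infer_instance

-- ===== CLAIM (what is proved, stated in full; the proofs are below) =====
def Claim_equal_sort_receipt_keys : Prop := ∀ (keys : List String), Dom_sort_receipt_keys keys → Spec_sort_receipt_keys keys (sort_receipt_keys keys)

-- ===== LEMMAS AND PROOFS =====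

-- A's two-accumulator partition loop is a pair of filters
theorem pvFold_eq_filters (keys : List String) (a b : List String) :
    keys.foldl
      (fun (acc : List String × List String) key =>
        if RECEIPT_KEY_ORDER.contains key then (acc.1 ++ [key], acc.2) else (acc.1, acc.2 ++ [key]))
      (a, b)
    = (a ++ keys.filter (fun k => RECEIPT_KEY_ORDER.contains k),
       b ++ keys.filter (fun k => !RECEIPT_KEY_ORDER.contains k)) := by
  induction keys generalizing a b with
  | nil => simp
  | cons x xs ih =>
    by_cases h : x ∈ RECEIPT_KEY_ORDER
    · rw [List.foldl_cons, if_pos (by simpa using h), ih]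
      simp [h, List.append_assoc]
    · rw [List.foldl_cons, if_neg (by simpa using h), ih]
      simp [h, List.append_assoc]

theorem pvInsertBy_append_left {α : Type} (before : α → α → Bool) (x : α) (l1 l2 : List α)
    (h : ∀ y ∈ l1, before x y = false) :
    PySem.List.insertBy before x (l1 ++ l2) = l1 ++ PySem.List.insertBy before x l2 := by
  induction l1 with
  | nil => simp
  | cons y ys ih =>
    have hy : before x y = false := h y (by simp)
    simp only [List.cons_append, PySem.List.insertBy, hy]
    simp [ih (fun z hz => h z (by simp [hz]))]

theorem pvInsertBy_all_before {α : Type} (before : α → α → Bool) (x : α) (l : List α)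
    (h : ∀ y ∈ l, before x y = true) :
    PySem.List.insertBy before x l = x :: l := by
  cases l with
  | nil => rfl
  | cons y ys => simp [PySem.List.insertBy, h y (by simp)]

theorem pvInsert_bucket (x : String) (pre post : List String)
    (hpre : ∀ y ∈ pre, decide (receiptKeyA x < receiptKeyA y) = false)
    (hpost : ∀ y ∈ post, decide (receiptKeyA x < receiptKeyA y) = true) :
    PySem.List.insertBy (fun a b => decide (receiptKeyA a < receiptKeyA b)) x (pre ++ post)
      = pre ++ x :: post := by
  rw [pvInsertBy_append_left _ _ _ _ hpre, pvInsertBy_all_before _ _ _ hpost]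

theorem pvSorted_known (xs : List String) (hall : ∀ k ∈ xs, RECEIPT_KEY_ORDER.contains k = true) :
    PySem.List.sorted xs receiptKeyA false
      = RECEIPT_KEY_ORDER.flatMap (fun ok => xs.filter (fun k => k == ok)) := by
  induction xs using List.reverseRecOn with
  | nil => simp [PySem.List.sorted]
  | append_singleton ys x ih =>
    have hys : ∀ k ∈ ys, RECEIPT_KEY_ORDER.contains k = true :=
      fun k hk => hall k (by simp [hk])
    have hx : RECEIPT_KEY_ORDER.contains x = true := hall x (by simp)
    have hstep : PySem.List.sorted (ys ++ [x]) receiptKeyA false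
        = PySem.List.insertBy (fun a b => decide (receiptKeyA a < receiptKeyA b)) x
            (PySem.List.sorted ys receiptKeyA false) := by
      rw [PySem.List.sorted_eq_foldl_insertBy, PySem.List.sorted_eq_foldl_insertBy,
        List.foldl_append]
      rfl
    rw [hstep, ih hys]
    have keyfact : ∀ (o : String), ∀ y ∈ ys.filter (fun k => k == o), y = o := by
      intro o y hy
      have := List.of_mem_filter hy
      simpa using this
    have hmem : x ∈ RECEIPT_KEY_ORDER := by simpa using hx
    fin_cases hmem
    · -- "packageid"
      simp only [RECEIPT_KEY_ORDER, List.flatMap_cons, List.flatMap_nil, List.append_nil,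
        List.filter_append, List.filter_cons, List.filter_nil]
      rw [pvInsert_bucket "packageid" (List.filter (fun k => k == "packageid") ys) _ ?p ?q]
      case p =>
        intro y hy
        rw [keyfact _ y hy]
        decide
      case q =>
        intro y hy
        simp only [List.mem_append] at hy
        rcases hy with hy | hy | hy | hy | hy <;> rw [keyfact _ y hy] <;> decide
      simp [List.append_assoc]
    · -- "name"
      simp only [RECEIPT_KEY_ORDER, List.flatMap_cons, List.flatMap_nil, List.append_nil,
        List.filter_append, List.filter_cons, List.filter_nil]
      rw [show List.filter (fun k => k == "packageid") ys ++ (List.filter (fun k => k == "name") ys ++ (List.filter (fun k => k == "filename") ys ++ (List.filter (fun k => k == "installed_size") ys ++ (List.filter (fun k => k == "version") ys ++ (List.filter (fun k => k == "optional") ys))))) = ((List.filter (fun k => k == "packageid") ys ++ (List.filter (fun k => k == "name") ys))) ++ ((List.filter (fun k => k == "filename") ys ++ (List.filter (fun k => k == "installed_size") ys ++ (List.filter (fun k => k == "version") ys ++ (List.filter (fun k => k == "optional") ys))))) by simp [List.append_assoc]]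
      rw [pvInsert_bucket "name" _ _ ?p ?q]
      case p =>
        intro y hy
        simp only [List.mem_append] at hy
        rcases hy with hy | hy <;> rw [keyfact _ y hy] <;> decide
      case q =>
        intro y hy
        simp only [List.mem_append] at hy
        rcases hy with hy | hy | hy | hy <;> rw [keyfact _ y hy] <;> decide
      simp [List.append_assoc]
    · -- "filename"
      simp only [RECEIPT_KEY_ORDER, List.flatMap_cons, List.flatMap_nil, List.append_nil,
        List.filter_append, List.filter_cons, List.filter_nil]
      rw [show List.filter (fun k => k == "packageid") ys ++ (List.filter (fun k => k == "name") ys ++ (List.filter (fun k => k == "filename") ys ++ (List.filter (fun k => k == "installed_size") ys ++ (List.filter (fun k => k == "version") ys ++ (List.filter (fun k => k == "optional") ys))))) = ((List.filter (fun k => k == "packageid") ys ++ (List.filter (fun k => k == "name") ys ++ (List.filter (fun k => k == "filename") ys)))) ++ ((List.filter (fun k => k == "installed_size") ys ++ (List.filter (fun k => k == "version") ys ++ (List.filter (fun k => k == "optional") ys)))) by simp [List.append_assoc]]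
      rw [pvInsert_bucket "filename" _ _ ?p ?q]
      case p =>
        intro y hy
        simp only [List.mem_append] at hy
        rcases hy with hy | hy | hy <;> rw [keyfact _ y hy] <;> decide
      case q =>
        intro y hy
        simp only [List.mem_append] at hy
        rcases hy with hy | hy | hy <;> rw [keyfact _ y hy] <;> decide
      simp [List.append_assoc]
    · -- "installed_size"
      simp only [RECEIPT_KEY_ORDER, List.flatMap_cons, List.flatMap_nil, List.append_nil,
        List.filter_append, List.filter_cons, List.filter_nil]
      rw [show List.filter (fun k => k == "packageid") ys ++ (List.filter (fun k => k == "name") ys ++ (List.filter (fun k => k == "filename") ys ++ (List.filter (fun k => k == "installed_size") ys ++ (List.filter (fun k => k == "version") ys ++ (List.filter (fun k => k == "optional") ys))))) = ((List.filter (fun k => k == "packageid") ys ++ (List.filter (fun k => k == "name") ys ++ (List.filter (fun k => k == "filename") ys ++ (List.filter (fun k => k == "installed_size") ys))))) ++ ((List.filter (fun k => k == "version") ys ++ (List.filter (fun k => k == "optional") ys))) by simp [List.append_assoc]]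
      rw [pvInsert_bucket "installed_size" _ _ ?p ?q]
      case p =>
        intro y hy
        simp only [List.mem_append] at hy
        rcases hy with hy | hy | hy | hy <;> rw [keyfact _ y hy] <;> decide
      case q =>
        intro y hy
        simp only [List.mem_append] at hy
        rcases hy with hy | hy <;> rw [keyfact _ y hy] <;> decide
      simp [List.append_assoc]
    · -- "version"
      simp only [RECEIPT_KEY_ORDER, List.flatMap_cons, List.flatMap_nil, List.append_nil,
        List.filter_append, List.filter_cons, List.filter_nil]
      rw [show List.filter (fun k => k == "packageid") ys ++ (List.filter (fun k => k == "name") ys ++ (List.filter (fun k => k == "filename") ys ++ (List.filter (fun k => k == "installed_size") ys ++ (List.filter (fun k => k == "version") ys ++ (List.filter (fun k => k == "optional") ys))))) = ((List.filter (fun k => k == "packageid") ys ++ (List.filter (fun k => k == "name") ys ++ (List.filter (fun k => k == "filename") ys ++ (List.filter (fun k => k == "installed_size") ys ++ (List.filter (fun k => k == "version") ys)))))) ++ ((List.filter (fun k => k == "optional") ys)) by simp [List.append_assoc]]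
      rw [pvInsert_bucket "version" _ _ ?p ?q]
      case p =>
        intro y hy
        simp only [List.mem_append] at hy
        rcases hy with hy | hy | hy | hy | hy <;> rw [keyfact _ y hy] <;> decide
      case q =>
        intro y hy
        rw [keyfact _ y hy]
        decide
      simp [List.append_assoc]
    · -- "optional"
      simp only [RECEIPT_KEY_ORDER, List.flatMap_cons, List.flatMap_nil, List.append_nil,
        List.filter_append, List.filter_cons, List.filter_nil]
      rw [PySem.List.insertBy_of_forall_not_before _ _ _ ?p]
      case p =>
        intro y hy
        simp only [List.mem_append] at hy
        rcases hy with hy | hy | hy | hy | hy | hy <;> rw [keyfact _ y hy] <;> decide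
      simp [List.append_assoc]

-- restricting a bucket filter to the known keys changes nothing
theorem pvFilter_known (keys : List String) (o : String) (ho : o ∈ RECEIPT_KEY_ORDER) :
    (keys.filter (fun k => RECEIPT_KEY_ORDER.contains k)).filter (fun k => k == o)
      = keys.filter (fun k => k == o) := by
  rw [List.filter_filter]
  apply List.filter_congr
  intro k _
  by_cases h : k = o
  · subst h; simp [ho]
  · simp [h]

theorem pvFlatMap_congr {a b : Type} (l : List a) (f g : a → List b)
    (h : ∀ x ∈ l, f x = g x) : l.flatMap f = l.flatMap g := by
  induction l with
  | nil => rfl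
  | cons x xs ih =>
    simp only [List.flatMap_cons, h x (by simp), ih (fun y hy => h y (by simp [hy]))]

-- ===== VERDICT (by name: the statement is the Claim_ definition above) =====
theorem sort_receipt_keys_spec : Claim_equal_sort_receipt_keys := by
  intro keys _
  unfold Spec_sort_receipt_keys sort_receipt_keys sort_receipt_keys_alt
  rw [pvFold_eq_filters]
  simp only [List.nil_append]
  rw [pvSorted_known (keys.filter (fun k => RECEIPT_KEY_ORDER.contains k))
    (fun k hk => (List.mem_filter.1 hk).2)]
  rw [pvFlatMap_congr RECEIPT_KEY_ORDER _ _ (fun o ho => pvFilter_known keys o ho)]
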